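-- pv_equiv track=rewrite | github.com/TianMingXTU/QuizMind | quizmind/services.py | _distribution_targets
-- ===== SOURCE A (Python) =====
-- import math
-- from typing import Dict, List, Sequence, Tuple
--
-- def _distribution_targets(total: int, mix: Dict[str, int]) -> Dict[str, int]:
--     counts = {name: max(0, math.floor(total * ratio / 100)) for name, ratio in mix.items()}
--     while sum(counts.values()) < total:
--         for name in sorted(mix, key=mix.get, reverse=True):
--             counts[name] += 1
--             if sum(counts.values()) >= total:
--                 break
--     return counts
-- ===== SOURCE B (Python) =====
-- from typing import Dict
--
--
-- def _distribution_targets(total: int, mix: Dict[str, int]) -> Dict[str, int]: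
--     counts = {name: max(0, (total * ratio) // 100) for name, ratio in mix.items()}
--     deficit = total - sum(counts.values())
--     if deficit > 0:
--         quotient, remainder = divmod(deficit, len(mix))
--         top = set(sorted(mix, key=mix.get, reverse=True)[:remainder])
--         counts = {name: c + quotient + (1 if name in top else 0)
--                   for name, c in counts.items()}
--     return counts
-- ===== Notes on version B (the rewrite author's own statement) =====
-- stated objective: alternative
-- what changed: replaces A's round-robin while-loop (which re-sorts the mix and re-sums all counts for every single increment) by one closed-form division of the deficit: each category gets deficit//n extra and the first deficit%n categories in ratio-descending order get one more.
import Mathlib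
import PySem

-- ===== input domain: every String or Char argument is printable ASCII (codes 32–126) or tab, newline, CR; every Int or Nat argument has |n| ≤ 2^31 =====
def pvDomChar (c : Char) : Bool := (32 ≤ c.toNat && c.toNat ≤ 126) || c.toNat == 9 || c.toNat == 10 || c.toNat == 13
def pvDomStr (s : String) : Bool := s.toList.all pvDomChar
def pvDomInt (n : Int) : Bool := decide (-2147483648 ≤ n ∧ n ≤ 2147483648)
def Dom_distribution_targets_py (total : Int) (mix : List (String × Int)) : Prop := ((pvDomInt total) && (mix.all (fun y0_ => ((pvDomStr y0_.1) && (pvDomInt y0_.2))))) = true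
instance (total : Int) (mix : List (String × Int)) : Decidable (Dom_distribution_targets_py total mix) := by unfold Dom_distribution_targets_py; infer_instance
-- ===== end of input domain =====

-- B replaces A's increment-one-at-a-time round-robin while loop by one closed-form
-- division of the deficit (a different algorithm; equality is proved on Pre_ below).

-- ===== PORT A =====
-- sum(counts.values())
def pvSumVals (c : List (String × Int)) : Int := (c.map Prod.snd).sum

-- counts[name] += 1 : bump the value at the first (unique, under Pre_) matching key
def pvBump : List (String × Int) → String → List (String × Int)
  | [], _ => []
  | (k, v) :: rest, n => if k = n then (k, v + 1) :: rest else (k, v) :: pvBump rest n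

-- sorted(mix, key=mix.get, reverse=True): stable descending sort of the (name, ratio)
-- pairs by ratio, names projected; exact for the unique-key dicts Pre_ admits.
def pvSortedNames (mix : List (String × Int)) : List String :=
  (PySem.List.sorted mix (fun p => p.2) true).map Prod.fst

-- the inner 'for name in sorted(...): counts[name] += 1; if sum >= total: break'
def pvForA : List String → List (String × Int) → Int → List (String × Int)
  | [], c, _ => c
  | n :: rest, c, t =>
    let c' := pvBump c n
    if t ≤ pvSumVals c' then c' else pvForA rest c' t

-- the outer 'while sum(counts.values()) < total'; the fuel only makes the loop total
-- (Python diverges exactly when mix = [] and 0 < total, which Pre_ excludes; inside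
-- Pre_ every loop pass raises the sum, so this fuel never runs out)
def pvWhileA (mix : List (String × Int)) (t : Int) : Nat → List (String × Int) → List (String × Int)
  | 0, c => c
  | fuel + 1, c =>
    if pvSumVals c < t then pvWhileA mix t fuel (pvForA (pvSortedNames mix) c t) else c

def distribution_targets_py (total : Int) (mix : List (String × Int)) : List (String × Int) :=
  -- math.floor(total * ratio / 100): ported as the exact floor division, which is what
  -- Python's float computes on every input Pre_ admits (|total*ratio| ≤ 2^52)
  let counts := mix.map (fun p => (p.1, max 0 (PySem.Int.floordiv (total * p.2) 100)))
  pvWhileA mix total ((total - pvSumVals counts).toNat + 1) counts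

-- ===== PORT B =====
def distribution_targets_py_alt (total : Int) (mix : List (String × Int)) : List (String × Int) :=
  let counts := mix.map (fun p => (p.1, max 0 (PySem.Int.floordiv (total * p.2) 100)))
  let deficit := total - pvSumVals counts
  if 0 < deficit then
    let quotient := PySem.Int.floordiv deficit (PySem.List.len mix)
    let remainder := PySem.Int.mod deficit (PySem.List.len mix)
    -- sorted(...)[:remainder] with 0 ≤ remainder < len(mix): the first `remainder` names
    let top := PySem.Set.ofList ((pvSortedNames mix).take remainder.toNat)
    counts.map (fun p => (p.1, p.2 + quotient + (if p.1 ∈ top then 1 else 0)))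
  else counts

-- ===== PRECONDITION & SPEC =====
-- Pre_ excludes: (a) duplicate names, which cannot arise from A's dict argument;
-- (b) mix = [] with 0 < total, where A loops forever (and B raises ZeroDivisionError);
-- (c) entries with |total*ratio| > 2^52, where A's float expression math.floor(total*ratio/100)
--     can round across an integer and then differs from the exact floor division B uses (see cites).
def Pre_distribution_targets_py (total : Int) (mix : List (String × Int)) : Prop :=
  (mix.map Prod.fst).Nodup ∧ (mix = [] → total ≤ 0) ∧
  ∀ p ∈ mix, (total * p.2).natAbs ≤ 2 ^ 52
instance (total : Int) (mix : List (String × Int)) : Decidable (Pre_distribution_targets_py total mix) := by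
  unfold Pre_distribution_targets_py; infer_instance

def pvWitness_distribution_targets_py : Int × (List (String × Int)) :=
  (10, [("a", 30), ("b", 70)])

def Spec_distribution_targets_py (total : Int) (mix : List (String × Int)) (out : List (String × Int)) : Prop := out = distribution_targets_py_alt total mix
instance (total : Int) (mix : List (String × Int)) (out : List (String × Int)) : Decidable (Spec_distribution_targets_py total mix out) := by unfold Spec_distribution_targets_py; infer_instance

-- ===== CLAIM (what is proved, stated in full; the proofs are below) =====
def Claim_equal_distribution_targets_py : Prop := ∀ (total : Int) (mix : List (String × Int)), Dom_distribution_targets_py total mix → Pre_distribution_targets_py total mix → Spec_distribution_targets_py total mix (distribution_targets_py total mix)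

-- ===== LEMMAS AND PROOFS =====

def pvBumpList (c : List (String × Int)) (l : List String) : List (String × Int) :=
  l.foldl pvBump c

theorem pvBump_keys (c : List (String × Int)) (n : String) :
    (pvBump c n).map Prod.fst = c.map Prod.fst := by
  induction c with
  | nil => rfl
  | cons p rest ih =>
    obtain ⟨k, v⟩ := p
    by_cases h : k = n <;> simp [pvBump, h, ih]

theorem pvBump_sum (c : List (String × Int)) (n : String)
    (h : n ∈ c.map Prod.fst) : pvSumVals (pvBump c n) = pvSumVals c + 1 := by
  induction c with
  | nil => simp at h
  | cons p rest ih =>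
    obtain ⟨k, v⟩ := p
    by_cases hk : k = n
    · simp [pvBump, hk, pvSumVals]; ring
    · have h' : n ∈ rest.map Prod.fst := by
        simp only [List.map_cons, List.mem_cons] at h
        rcases h with h1 | h1
        · exact absurd h1.symm hk
        · exact h1
      have hrec := ih h'
      simp only [pvBump, if_neg hk, pvSumVals, List.map_cons, List.sum_cons] at hrec ⊢
      omega

theorem pvBump_eq_map (c : List (String × Int)) (n : String)
    (hnd : (c.map Prod.fst).Nodup) :
    pvBump c n = c.map (fun p => if p.1 = n then (p.1, p.2 + 1) else p) := by
  induction c with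
  | nil => rfl
  | cons p rest ih =>
    obtain ⟨k, v⟩ := p
    simp only [List.map_cons, List.nodup_cons] at hnd
    by_cases hk : k = n
    · subst hk
      have : rest.map (fun p => if p.1 = k then (p.1, p.2 + 1) else p) = rest.map id := by
        apply List.map_congr_left
        intro q hq
        have : q.1 ≠ k := by
          intro h
          exact hnd.1 (h ▸ List.mem_map_of_mem hq)
        simp [this]
      simp [pvBump, this]
    · simp [pvBump, hk, ih hnd.2]

theorem pvBumpList_keys (l : List String) :
    ∀ c : List (String × Int), (pvBumpList c l).map Prod.fst = c.map Prod.fst := by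
  induction l with
  | nil => intro c; rfl
  | cons n rest ih =>
    intro c
    show (pvBumpList (pvBump c n) rest).map Prod.fst = _
    rw [ih, pvBump_keys]

theorem pvBumpList_sum (l : List String) :
    ∀ c : List (String × Int), (∀ n ∈ l, n ∈ c.map Prod.fst) →
      pvSumVals (pvBumpList c l) = pvSumVals c + l.length := by
  induction l with
  | nil => intro c _; simp [pvBumpList]
  | cons n rest ih =>
    intro c hmem
    show pvSumVals (pvBumpList (pvBump c n) rest) = _
    rw [ih _ (fun m hm => by rw [pvBump_keys]; exact hmem m (List.mem_cons_of_mem _ hm)),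
      pvBump_sum c n (hmem n (List.mem_cons_self ..))]
    simp; ring

theorem pvBumpList_eq_map (l : List String) :
    ∀ c : List (String × Int), (c.map Prod.fst).Nodup → l.Nodup →
      pvBumpList c l = c.map (fun p => (p.1, p.2 + if p.1 ∈ l then 1 else 0)) := by
  induction l with
  | nil =>
    intro c _ _
    simp [pvBumpList]
  | cons n rest ih =>
    intro c hc hl
    simp only [List.nodup_cons] at hl
    show pvBumpList (pvBump c n) rest = _
    rw [ih _ (by rw [pvBump_keys]; exact hc) hl.2, pvBump_eq_map c n hc, List.map_map]
    apply List.map_congr_left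
    intro p _
    by_cases hp : p.1 = n
    · simp [Function.comp, hp, hl.1]
    · simp [Function.comp, hp]

theorem pvForA_eq (names : List String) :
    ∀ (c : List (String × Int)) (t : Int),
      (∀ n ∈ names, n ∈ c.map Prod.fst) → 0 < t - pvSumVals c →
      pvForA names c t = pvBumpList c (names.take (t - pvSumVals c).toNat) := by
  induction names with
  | nil => intro c t _ _; simp [pvForA, pvBumpList]
  | cons n rest ih =>
    intro c t hmem hd
    have hsum : pvSumVals (pvBump c n) = pvSumVals c + 1 :=
      pvBump_sum c n (hmem n (List.mem_cons_self ..))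
    show (if t ≤ pvSumVals (pvBump c n) then pvBump c n
          else pvForA rest (pvBump c n) t) = _
    by_cases hstop : t ≤ pvSumVals (pvBump c n)
    · have : (t - pvSumVals c).toNat = 1 := by omega
      rw [if_pos hstop, this]
      rfl
    · rw [if_neg hstop,
        ih (pvBump c n) t
          (fun m hm => by rw [pvBump_keys]; exact hmem m (List.mem_cons_of_mem _ hm))
          (by omega)]
      have harith : (t - pvSumVals c).toNat = (t - pvSumVals (pvBump c n)).toNat + 1 := by omega
      rw [harith, List.take_succ_cons]
      rfl

theorem pvWhileA_eq (mix : List (String × Int)) (t : Int)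
    (hnd : (mix.map Prod.fst).Nodup) (hne : mix ≠ []) :
    ∀ (fuel d : Nat) (c : List (String × Int)),
      d < fuel → t - pvSumVals c = (d : Int) → c.map Prod.fst = mix.map Prod.fst →
      pvWhileA mix t fuel c =
        c.map (fun p => (p.1, p.2 + ((d / mix.length : Nat) : Int) +
          (if p.1 ∈ (pvSortedNames mix).take (d % mix.length) then 1 else 0))) := by
  have hperm : (pvSortedNames mix).Perm (mix.map Prod.fst) :=
    (PySem.List.sorted_perm mix (fun p => p.2) true).map Prod.fst
  have hnames_nd : (pvSortedNames mix).Nodup := (hperm.nodup_iff).2 hnd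
  have hlen : (pvSortedNames mix).length = mix.length := by
    rw [hperm.length_eq, List.length_map]
  have hn : 0 < mix.length := List.length_pos_of_ne_nil hne
  intro fuel
  induction fuel with
  | zero => intro d c hfd; omega
  | succ fuel ih =>
    intro d c hfd hdc hkeys
    have hmem : ∀ n ∈ pvSortedNames mix, n ∈ c.map Prod.fst := by
      intro n hn'; rw [hkeys]; exact hperm.mem_iff.1 hn'
    show (if pvSumVals c < t then pvWhileA mix t fuel (pvForA (pvSortedNames mix) c t) else c) = _
    by_cases hpos : 0 < d
    · rw [if_pos (by omega)]
      rw [pvForA_eq _ c t hmem (by omega), hdc]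
      simp only [Int.toNat_natCast]
      set c' := pvBumpList c ((pvSortedNames mix).take d) with hc'
      have htake_nd : ((pvSortedNames mix).take d).Nodup := hnames_nd.sublist (List.take_sublist _ _)
      have hc'_eq : c' = c.map (fun p =>
          (p.1, p.2 + if p.1 ∈ (pvSortedNames mix).take d then 1 else 0)) :=
        pvBumpList_eq_map _ c (hkeys ▸ hnd) htake_nd
      have hc'_keys : c'.map Prod.fst = mix.map Prod.fst := by
        rw [hc', pvBumpList_keys, hkeys]
      by_cases hdn : d ≤ mix.length
      · -- terminal pass: the sum reaches t during (or exactly at the end of) this pass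
        have htlen : ((pvSortedNames mix).take d).length = d := by
          rw [List.length_take]; omega
        have hsum' : pvSumVals c' = pvSumVals c + d := by
          rw [hc', pvBumpList_sum _ c (fun m hm => hmem m (List.mem_of_mem_take hm)), htlen]
        have : pvWhileA mix t fuel c' = c'.map (fun p => (p.1, p.2 + ((0 / mix.length : Nat) : Int) +
            (if p.1 ∈ (pvSortedNames mix).take (0 % mix.length) then 1 else 0))) :=
          ih 0 c' (by omega) (by omega) hc'_keys
        rw [this]
        simp only [Nat.zero_div, Nat.zero_mod, List.take_zero, List.not_mem_nil, if_false,
          Nat.cast_zero, add_zero]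
        have : c'.map (fun p => (p.1, p.2)) = c' := by
          simp
        rw [this, hc'_eq]
        rcases Nat.lt_or_ge d mix.length with hlt | hge
        · -- d < n: quotient 0, remainder d
          rw [Nat.div_eq_of_lt hlt, Nat.mod_eq_of_lt hlt]
          simp
        · -- d = n: one full pass, quotient 1, remainder 0
          have hdeq : d = mix.length := by omega
          subst hdeq
          rw [Nat.div_self hn, Nat.mod_self]
          simp only [List.take_zero, List.not_mem_nil, if_false, add_zero]
          apply List.map_congr_left
          intro p hp
          have hpmem : p.1 ∈ pvSortedNames mix := by
            apply hperm.mem_iff.2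
            rw [← hkeys]
            exact List.mem_map_of_mem hp
          rw [← hlen, List.take_length]
          simp [hpmem]
      · -- full pass, d > n: recurse with deficit d - n
        have htake_all : (pvSortedNames mix).take d = pvSortedNames mix :=
          List.take_of_length_le (by omega)
        have hsum' : pvSumVals c' = pvSumVals c + mix.length := by
          rw [hc', htake_all, pvBumpList_sum _ c (fun m hm => hmem m hm), hlen]
        have hrec : pvWhileA mix t fuel c' =
            c'.map (fun p => (p.1, p.2 + (((d - mix.length) / mix.length : Nat) : Int) +
              (if p.1 ∈ (pvSortedNames mix).take ((d - mix.length) % mix.length) then 1 else 0))) :=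
          ih (d - mix.length) c' (by omega) (by omega) hc'_keys
        rw [hrec, hc'_eq, htake_all, List.map_map]
        apply List.map_congr_left
        intro p hp
        have hpmem : p.1 ∈ pvSortedNames mix := by
          apply hperm.mem_iff.2
          rw [← hkeys]
          exact List.mem_map_of_mem hp
        have hdiv : d / mix.length = (d - mix.length) / mix.length + 1 := by
          conv_lhs => rw [show d = (d - mix.length) + mix.length by omega]
          rw [Nat.add_div_right _ hn]
        have hmod : d % mix.length = (d - mix.length) % mix.length := by
          conv_lhs => rw [show d = (d - mix.length) + mix.length by omega]
          rw [Nat.add_mod_right]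
        simp only [Function.comp, hpmem, if_true, hdiv, hmod, Prod.mk.injEq, true_and]
        push_cast
        ring
    · -- d = 0: the while condition is false
      have hd0 : d = 0 := by omega
      subst hd0
      rw [if_neg (by omega)]
      simp

theorem pvCounts_keys (total : Int) (mix : List (String × Int)) :
    (mix.map (fun p => (p.1, max 0 (PySem.Int.floordiv (total * p.2) 100)))).map Prod.fst
      = mix.map Prod.fst := by
  rw [List.map_map]; rfl

-- ===== VERDICT (by name: the statement is the Claim_ definition above) =====
theorem distribution_targets_py_spec : Claim_equal_distribution_targets_py := by
  intro total mix _ hpre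
  obtain ⟨hnd, hempty, -⟩ := hpre
  unfold Spec_distribution_targets_py distribution_targets_py distribution_targets_py_alt
  set counts := mix.map (fun p => (p.1, max 0 (PySem.Int.floordiv (total * p.2) 100))) with hcounts
  by_cases hdef : 0 < total - pvSumVals counts
  · -- positive deficit: the loop distributes it round-robin; B's closed form agrees
    have hne : mix ≠ [] := by
      intro h
      rw [h] at hcounts
      simp [hcounts, pvSumVals] at hdef
      have := hempty h
      omega
    rw [if_pos hdef]
    set d0 := total - pvSumVals counts with hd0
    have hcast : d0 = ((d0.toNat : Nat) : Int) := by omega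
    rw [pvWhileA_eq mix total hnd hne (d0.toNat + 1) d0.toNat counts (by omega) (by omega)
      (pvCounts_keys total mix)]
    have hn : 0 < mix.length := List.length_pos_of_ne_nil hne
    have hquot : PySem.Int.floordiv d0 (PySem.List.len mix) = ((d0.toNat / mix.length : Nat) : Int) := by
      conv_lhs => rw [hcast, PySem.List.len_eq]
      exact PySem.Int.floordiv_natCast _ _
    have hrem : (PySem.Int.mod d0 (PySem.List.len mix)).toNat = d0.toNat % mix.length := by
      conv_lhs => rw [hcast, PySem.List.len_eq, PySem.Int.mod_natCast]
      exact Int.toNat_natCast _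
    show _ = List.map (fun p => (p.1,
        p.2 + PySem.Int.floordiv d0 (PySem.List.len mix) +
          if p.1 ∈ PySem.Set.ofList
              ((pvSortedNames mix).take (PySem.Int.mod d0 (PySem.List.len mix)).toNat)
            then (1 : Int) else 0)) counts
    rw [hquot, hrem]
    apply List.map_congr_left
    intro p _
    simp [PySem.Set.mem_ofList]
  · -- deficit ≤ 0: the while loop never runs, B keeps the base counts
    rw [if_neg hdef]
    have h0 : (total - pvSumVals counts).toNat = 0 := by omega
    show pvWhileA mix total ((total - pvSumVals counts).toNat + 1) counts = counts
    rw [h0]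
    show (if pvSumVals counts < total then _ else counts) = counts
    rw [if_neg (by omega)]
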